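-- pv_equiv track=rewrite | github.com/cirosantilli/project-euler-solvers | solvers/599.py | count_sequences_12_sum0
-- ===== SOURCE A (Python) =====
-- def count_sequences_12_sum0(max_len: int):
--     """
--     For r = 0..max_len, compute B(r) where
--     B(r) = number of r-tuples in {1,2}^r with sum ≡ 0 (mod 3).
--     """
--     dp = [[0, 0, 0] for _ in range(max_len + 1)]
--     dp[0][0] = 1
--     for r in range(max_len):
--         for s in range(3):
--             dp[r + 1][(s + 1) % 3] += dp[r][s]
--             dp[r + 1][(s + 2) % 3] += dp[r][s]
--     return [dp[r][0] for r in range(max_len + 1)]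
-- ===== SOURCE B (Python) =====
-- def count_sequences_12_sum0(max_len: int):
--     """
--     For r = 0..max_len, compute B(r) where
--     B(r) = number of r-tuples in {1,2}^r with sum ≡ 0 (mod 3).
--     Closed form: B(r) = (2**r + 2*(-1)**r) // 3 (exact division).
--     """
--     return [(2 ** r + 2 * (-1) ** r) // 3 for r in range(max_len + 1)]
-- ===== Notes on version B (the rewrite author's own statement) =====
-- stated objective: simpler
-- what changed: Replaced the 3-residue DP table propagation by a direct closed-form formula B(r) = (2**r + 2*(-1)**r) // 3 evaluated independently for each r.
import Mathlib
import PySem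

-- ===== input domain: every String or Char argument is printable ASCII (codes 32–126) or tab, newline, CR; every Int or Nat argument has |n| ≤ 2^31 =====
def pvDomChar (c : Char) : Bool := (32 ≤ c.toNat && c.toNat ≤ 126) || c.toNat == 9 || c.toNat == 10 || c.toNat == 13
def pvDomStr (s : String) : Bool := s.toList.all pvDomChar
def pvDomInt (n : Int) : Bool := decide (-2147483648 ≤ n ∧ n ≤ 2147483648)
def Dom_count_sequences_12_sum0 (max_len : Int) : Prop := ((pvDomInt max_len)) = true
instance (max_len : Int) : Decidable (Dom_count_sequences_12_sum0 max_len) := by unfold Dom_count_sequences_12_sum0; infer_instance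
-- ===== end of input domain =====

-- B replaces A's 3-residue DP table by the closed form B(r) = (2^r + 2*(-1)^r) // 3 per index (simpler, no table).


-- ===== PORT A =====
-- inner body: the two '+=' statements of 'for s in range(3)'
def pvInnerBody (r : Int) (dp : List (List Int)) (s : Int) : List (List Int) :=
  let a := PySem.List.pyGetD (PySem.List.pyGetD dp r []) s 0
  let i1 := PySem.Int.mod (s + 1) 3
  let row1 := PySem.List.pyGetD dp (r + 1) []
  let dp := PySem.List.pySetD dp (r + 1) (PySem.List.pySetD row1 i1 (PySem.List.pyGetD row1 i1 0 + a))
  let a2 := PySem.List.pyGetD (PySem.List.pyGetD dp r []) s 0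
  let i2 := PySem.Int.mod (s + 2) 3
  let row2 := PySem.List.pyGetD dp (r + 1) []
  PySem.List.pySetD dp (r + 1) (PySem.List.pySetD row2 i2 (PySem.List.pyGetD row2 i2 0 + a2))

def count_sequences_12_sum0 (max_len : Int) : List Int :=
  let dp0 := (PySem.List.pyRange 0 (max_len + 1) 1).map (fun _ => ([0, 0, 0] : List Int))
  let dp1 := PySem.List.pySetD dp0 0 (PySem.List.pySetD (PySem.List.pyGetD dp0 0 []) 0 1)
  let dp := (PySem.List.pyRange 0 max_len 1).foldl
      (fun dp r => (PySem.List.pyRange 0 3 1).foldl (pvInnerBody r) dp) dp1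
  (PySem.List.pyRange 0 (max_len + 1) 1).map
    (fun r => PySem.List.pyGetD (PySem.List.pyGetD dp r []) 0 0)

-- ===== PORT B =====
def count_sequences_12_sum0_alt (max_len : Int) : List Int :=
  (PySem.List.pyRange 0 (max_len + 1) 1).map
    (fun r => PySem.Int.floordiv (2 ^ r.toNat + 2 * (-1) ^ r.toNat) 3)

-- ===== PRECONDITION & SPEC =====
-- Pre_ excludes exactly max_len < 0, where Python A raises IndexError (dp is the empty list when dp[0][0] = 1 runs).
def Pre_count_sequences_12_sum0 (max_len : Int) : Prop := 0 ≤ max_len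
instance (max_len : Int) : Decidable (Pre_count_sequences_12_sum0 max_len) := by unfold Pre_count_sequences_12_sum0; infer_instance
def pvWitness_count_sequences_12_sum0 : Int := 3

def Spec_count_sequences_12_sum0 (max_len : Int) (out : List Int) : Prop := out = count_sequences_12_sum0_alt max_len
instance (max_len : Int) (out : List Int) : Decidable (Spec_count_sequences_12_sum0 max_len out) := by unfold Spec_count_sequences_12_sum0; infer_instance

-- ===== CLAIM (what is proved, stated in full; the proofs are below) =====
def Claim_equal_count_sequences_12_sum0 : Prop := ∀ (max_len : Int), Dom_count_sequences_12_sum0 max_len → Pre_count_sequences_12_sum0 max_len → Spec_count_sequences_12_sum0 max_len (count_sequences_12_sum0 max_len)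

-- ===== LEMMAS AND PROOFS =====

-- the residue-count pair: (pvPQ r).1 tuples with sum ≡ 0, (pvPQ r).2 with sum ≡ 1 (= sum ≡ 2)
def pvPQ : Nat → Int × Int
  | 0 => (1, 0)
  | n + 1 => ((pvPQ n).2 + (pvPQ n).2, (pvPQ n).1 + (pvPQ n).2)

def pvRow (r : Nat) : List Int := [(pvPQ r).1, (pvPQ r).2, (pvPQ r).2]

-- the dp table after the outer-loop iterations r = 0 .. k-1 (n = max_len)
def pvDP (n k : Nat) : List (List Int) :=
  (List.range (n + 1)).map (fun r => if r ≤ k then pvRow r else [0, 0, 0])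

lemma pvPQ_closed (r : Nat) :
    3 * (pvPQ r).1 = 2 ^ r + 2 * (-1 : Int) ^ r ∧ 3 * (pvPQ r).2 = 2 ^ r - (-1 : Int) ^ r := by
  induction r with
  | zero => simp [pvPQ]
  | succ n ih => simp [pvPQ, pow_succ]; constructor <;> nlinarith [ih.1, ih.2]

lemma pvGetD_set_self (dp : List (List Int)) (k : Nat) (row : List Int) (hk : k + 1 < dp.length) :
    (dp.set (k + 1) row).getD (k + 1) [] = row := by simp [List.getD, hk]

lemma pvGetD_set_prev (dp : List (List Int)) (k : Nat) (row : List Int) :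
    (dp.set (k + 1) row).getD k [] = dp.getD k [] := by
  simp [List.getD, List.getElem?_set_ne (by omega : k + 1 ≠ k)]

lemma pvBody0 (dp : List (List Int)) (k : Nat) (hk : k + 1 < dp.length)
    (a b c u v w : Int) (h1 : dp.getD k [] = [a, b, c]) (h2 : dp.getD (k + 1) [] = [u, v, w]) :
    pvInnerBody (k : Int) dp 0 = dp.set (k + 1) [u, v + a, w + a] := by
  have hc : ((k : Int) + 1) = ((k + 1 : Nat) : Int) := by push_cast; ring
  have e1 : PySem.Int.mod ((0 : Int) + 1) 3 = 1 := by decide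
  have e2 : PySem.Int.mod ((0 : Int) + 2) 3 = 2 := by decide
  simp only [pvInnerBody, hc, e1, e2, PySem.List.pySetD_natCast, PySem.List.pyGetD_natCast, h1, h2]
  have s1 : PySem.List.pySetD [u, v, w] (1 : Int) (PySem.List.pyGetD [u, v, w] (1 : Int) 0 + PySem.List.pyGetD [a, b, c] (0 : Int) 0) = [u, v + a, w] := rfl
  rw [s1, pvGetD_set_prev, h1, pvGetD_set_self _ _ _ hk]
  have s2 : PySem.List.pySetD [u, v + a, w] (2 : Int) (PySem.List.pyGetD [u, v + a, w] (2 : Int) 0 + PySem.List.pyGetD [a, b, c] (0 : Int) 0) = [u, v + a, w + a] := rfl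
  rw [s2, List.set_set]

lemma pvBody1 (dp : List (List Int)) (k : Nat) (hk : k + 1 < dp.length)
    (a b c u v w : Int) (h1 : dp.getD k [] = [a, b, c]) (h2 : dp.getD (k + 1) [] = [u, v, w]) :
    pvInnerBody (k : Int) dp 1 = dp.set (k + 1) [u + b, v, w + b] := by
  have hc : ((k : Int) + 1) = ((k + 1 : Nat) : Int) := by push_cast; ring
  have e1 : PySem.Int.mod ((1 : Int) + 1) 3 = 2 := by decide
  have e2 : PySem.Int.mod ((1 : Int) + 2) 3 = 0 := by decide
  simp only [pvInnerBody, hc, e1, e2, PySem.List.pySetD_natCast, PySem.List.pyGetD_natCast, h1, h2]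
  have s1 : PySem.List.pySetD [u, v, w] (2 : Int) (PySem.List.pyGetD [u, v, w] (2 : Int) 0 + PySem.List.pyGetD [a, b, c] (1 : Int) 0) = [u, v, w + b] := rfl
  rw [s1, pvGetD_set_prev, h1, pvGetD_set_self _ _ _ hk]
  have s2 : PySem.List.pySetD [u, v, w + b] (0 : Int) (PySem.List.pyGetD [u, v, w + b] (0 : Int) 0 + PySem.List.pyGetD [a, b, c] (1 : Int) 0) = [u + b, v, w + b] := rfl
  rw [s2, List.set_set]

lemma pvBody2 (dp : List (List Int)) (k : Nat) (hk : k + 1 < dp.length)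
    (a b c u v w : Int) (h1 : dp.getD k [] = [a, b, c]) (h2 : dp.getD (k + 1) [] = [u, v, w]) :
    pvInnerBody (k : Int) dp 2 = dp.set (k + 1) [u + c, v + c, w] := by
  have hc : ((k : Int) + 1) = ((k + 1 : Nat) : Int) := by push_cast; ring
  have e1 : PySem.Int.mod ((2 : Int) + 1) 3 = 0 := by decide
  have e2 : PySem.Int.mod ((2 : Int) + 2) 3 = 1 := by decide
  simp only [pvInnerBody, hc, e1, e2, PySem.List.pySetD_natCast, PySem.List.pyGetD_natCast, h1, h2]
  have s1 : PySem.List.pySetD [u, v, w] (0 : Int) (PySem.List.pyGetD [u, v, w] (0 : Int) 0 + PySem.List.pyGetD [a, b, c] (2 : Int) 0) = [u + c, v, w] := rfl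
  rw [s1, pvGetD_set_prev, h1, pvGetD_set_self _ _ _ hk]
  have s2 : PySem.List.pySetD [u + c, v, w] (1 : Int) (PySem.List.pyGetD [u + c, v, w] (1 : Int) 0 + PySem.List.pyGetD [a, b, c] (2 : Int) 0) = [u + c, v + c, w] := rfl
  rw [s2, List.set_set]

lemma pvInner_step (dp : List (List Int)) (k : Nat) (hk : k + 1 < dp.length)
    (a b c u v w : Int) (h1 : dp.getD k [] = [a, b, c]) (h2 : dp.getD (k + 1) [] = [u, v, w]) :
    (PySem.List.pyRange 0 3 1).foldl (pvInnerBody (k : Int)) dp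
      = dp.set (k + 1) [u + b + c, v + a + c, w + a + b] := by
  have hr : PySem.List.pyRange 0 3 1 = [0, 1, 2] := by decide
  rw [hr]
  simp only [List.foldl]
  rw [pvBody0 dp k hk a b c u v w h1 h2]
  have hl : k + 1 < (dp.set (k + 1) [u, v + a, w + a]).length := by simpa using hk
  rw [pvBody1 _ k hl a b c u (v + a) (w + a) (by rw [pvGetD_set_prev, h1]) (pvGetD_set_self _ _ _ hk)]
  rw [List.set_set]
  have hl2 : k + 1 < (dp.set (k + 1) [u + b, v + a, w + a + b]).length := by simpa using hk
  rw [pvBody2 _ k hl2 a b c (u + b) (v + a) (w + a + b) (by rw [pvGetD_set_prev, h1]) (pvGetD_set_self _ _ _ hk)]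
  rw [List.set_set]

lemma pvDP_length (n k : Nat) : (pvDP n k).length = n + 1 := by simp [pvDP]

lemma pvDP_getD (n k r : Nat) (hr : r < n + 1) :
    (pvDP n k).getD r [] = if r ≤ k then pvRow r else [0, 0, 0] :=
  PySem.List.getD_map_range _ _ _ _ hr

lemma pvDP_set (n m : Nat) :
    (pvDP n m).set (m + 1) (pvRow (m + 1)) = pvDP n (m + 1) := by
  apply List.ext_getElem (by simp [pvDP])
  intro i h1 h2
  simp only [pvDP, List.getElem_set, List.getElem_map, List.getElem_range]
  by_cases hi : m + 1 = i
  · subst hi; simp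
  · rw [if_neg hi]
    split_ifs with h h'
    · rfl
    · omega
    · omega
    · rfl

lemma pvDP_zero (n : Nat) :
    pvDP n 0 = ((List.range (n + 1)).map (fun _ => ([0, 0, 0] : List Int))).set 0 [1, 0, 0] := by
  apply List.ext_getElem (by simp [pvDP])
  intro i h1 h2
  simp only [pvDP, List.getElem_set, List.getElem_map, List.getElem_range]
  by_cases hi : i = 0
  · subst hi; simp [pvRow, pvPQ]
  · rw [if_neg (by omega), if_neg (by omega)]

lemma pvLoop (n m : Nat) (hm : m ≤ n) :
    (PySem.List.pyRange 0 (m : Int) 1).foldl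
      (fun dp r => (PySem.List.pyRange 0 3 1).foldl (pvInnerBody r) dp) (pvDP n 0)
      = pvDP n m := by
  induction m with
  | zero => simp [pysem]
  | succ m ih =>
      have hc : ((m + 1 : Nat) : Int) = (m : Int) + 1 := by push_cast; ring
      rw [hc, PySem.List.pyRange_one_succ_right (by positivity), List.foldl_append,
        ih (by omega)]
      simp only [List.foldl_cons, List.foldl_nil]
      rw [pvInner_step (pvDP n m) m (by rw [pvDP_length]; omega)
        (pvPQ m).1 (pvPQ m).2 (pvPQ m).2 0 0 0
        (by rw [pvDP_getD n m m (by omega), if_pos (le_refl m)]; rfl)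
        (by rw [pvDP_getD n m (m + 1) (by omega), if_neg (by omega)])]
      rw [show ([0 + (pvPQ m).2 + (pvPQ m).2, 0 + (pvPQ m).1 + (pvPQ m).2, 0 + (pvPQ m).1 + (pvPQ m).2] : List Int)
            = pvRow (m + 1) by simp [pvRow, pvPQ]]
      exact pvDP_set n m

lemma pvA_eq (n : Nat) :
    count_sequences_12_sum0 (n : Int) = (List.range (n + 1)).map (fun r => (pvPQ r).1) := by
  unfold count_sequences_12_sum0
  have hcast : (n : Int) + 1 = ((n + 1 : Nat) : Int) := by push_cast; ring
  have hinit : PySem.List.pySetD ((PySem.List.pyRange 0 ((n : Int) + 1) 1).map (fun _ => ([0, 0, 0] : List Int)))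
      (0 : Int) (PySem.List.pySetD (PySem.List.pyGetD ((PySem.List.pyRange 0 ((n : Int) + 1) 1).map (fun _ => ([0, 0, 0] : List Int))) (0 : Int) []) (0 : Int) 1)
      = pvDP n 0 := by
    rw [pvDP_zero, hcast, PySem.List.pyRange_zero_natCast, List.map_map,
      show ((fun _ => ([0, 0, 0] : List Int)) ∘ (fun k : Nat => (k : Int))) = (fun _ : Nat => ([0, 0, 0] : List Int)) from rfl]
    have h0 : PySem.List.pyGetD ((List.range (n + 1)).map (fun _ : Nat => ([0, 0, 0] : List Int))) (0 : Int) [] = [0, 0, 0] := by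
      simp [pysem]
    rw [h0]
    have h1 : PySem.List.pySetD ([0, 0, 0] : List Int) (0 : Int) 1 = [1, 0, 0] := by simp [pysem]
    rw [h1]
    have h2 : ∀ (xs : List (List Int)) (v : List Int), PySem.List.pySetD xs (0 : Int) v = xs.set 0 v := by
      intro xs v; simp [pysem]
    rw [h2]
  simp only []
  rw [hinit, pvLoop n n (le_refl n)]
  rw [hcast, PySem.List.pyRange_zero_natCast, List.map_map]
  apply List.map_congr_left
  intro k hk
  have hk' : k < n + 1 := by simpa using List.mem_range.mp hk
  simp only [Function.comp]
  rw [PySem.List.pyGetD_natCast, pvDP_getD n n k hk', if_pos (by omega)]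
  rfl

lemma pvB_eq (n : Nat) :
    count_sequences_12_sum0_alt (n : Int) = (List.range (n + 1)).map (fun r => (pvPQ r).1) := by
  unfold count_sequences_12_sum0_alt
  have hcast : (n : Int) + 1 = ((n + 1 : Nat) : Int) := by push_cast; ring
  rw [hcast, PySem.List.pyRange_zero_natCast, List.map_map]
  apply List.map_congr_left
  intro k _
  simp only [Function.comp, Int.toNat_natCast]
  rw [show (2 : Int) ^ k + 2 * (-1) ^ k = 3 * (pvPQ k).1 from (pvPQ_closed k).1.symm]
  rw [PySem.Int.floordiv_eq_ediv_of_pos (by norm_num)]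
  exact Int.mul_ediv_cancel_left _ (by norm_num)

-- ===== VERDICT (by name: the statement is the Claim_ definition above) =====
theorem count_sequences_12_sum0_spec : Claim_equal_count_sequences_12_sum0 := by
  intro m _ hpre
  unfold Spec_count_sequences_12_sum0
  obtain ⟨n, rfl⟩ : ∃ n : Nat, m = (n : Int) := ⟨m.toNat, (Int.toNat_of_nonneg hpre).symm⟩
  rw [pvA_eq, pvB_eq]
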